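-- pv_equiv track=rewrite | github.com/tmlittau/QuASAr_slim | scripts/run_ablation_study.py | _partition_qubits
-- ===== SOURCE A (Python) =====
-- from typing import Dict, Iterable, List, Optional, Sequence, Tuple
--
-- def _partition_qubits(num_qubits: int, num_components: int) -> List[Tuple[int, ...]]:
--     if num_components <= 0:
--         raise ValueError("num_components must be positive")
--     if num_qubits < num_components:
--         raise ValueError("num_qubits must be at least num_components")
--     base = num_qubits // num_components
--     remainder = num_qubits % num_components
--     blocks: List[Tuple[int, ...]] = []
--     start = 0
--     for idx in range(num_components):
--         size = base + (1 if idx < remainder else 0)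
--         block = tuple(range(start, start + size))
--         blocks.append(block)
--         start += size
--     return blocks
-- ===== SOURCE B (Python) =====
-- def _partition_qubits(num_qubits, num_components):
--     if num_components <= 0:
--         raise ValueError("num_components must be positive")
--     if num_qubits < num_components:
--         raise ValueError("num_qubits must be at least num_components")
--     # Stage 1: build the multiset of block sizes by list repetition (larger blocks first).
--     base, remainder = divmod(num_qubits, num_components)
--     sizes = [base + 1] * remainder + [base] * (num_components - remainder)
--     # Stage 2: materialize the qubit indices and deal them out by slicing.
--     qubits = list(range(num_qubits))
--     blocks = []
--     for size in sizes:
--         blocks.append(tuple(qubits[:size]))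
--         qubits = qubits[size:]
--     return blocks
-- ===== Notes on version B (the rewrite author's own statement) =====
-- stated objective: alternative
-- what changed: Replaced A's single arithmetic loop (running start offset plus a per-index remainder test) by two staged passes: build the block-size multiset by list repetition ([base+1]*remainder + [base]*rest), then deal out a materialized list(range(num_qubits)) by repeated slicing.
import Mathlib
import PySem

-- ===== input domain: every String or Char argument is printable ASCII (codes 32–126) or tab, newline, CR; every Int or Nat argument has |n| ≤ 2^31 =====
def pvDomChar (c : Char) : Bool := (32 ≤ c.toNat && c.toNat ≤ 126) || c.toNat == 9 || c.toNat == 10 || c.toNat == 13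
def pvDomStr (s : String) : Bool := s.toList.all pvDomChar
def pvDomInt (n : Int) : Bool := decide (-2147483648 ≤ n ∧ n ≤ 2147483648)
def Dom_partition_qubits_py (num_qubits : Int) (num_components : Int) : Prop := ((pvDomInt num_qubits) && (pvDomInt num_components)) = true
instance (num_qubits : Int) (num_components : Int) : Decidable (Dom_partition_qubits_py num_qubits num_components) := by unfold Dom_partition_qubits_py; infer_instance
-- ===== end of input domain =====

-- B replaces A's arithmetic loop (running start, per-index remainder test) by two staged passes:
-- build the block-size multiset by list repetition, then deal out a materialized index list by slicing.
-- ===== PORT A =====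
def partition_qubits_py (num_qubits : Int) (num_components : Int) : List (List Int) :=
  let base := PySem.Int.floordiv num_qubits num_components
  let remainder := PySem.Int.mod num_qubits num_components
  let res := (PySem.List.pyRange 0 num_components 1).foldl
    (fun (st : List (List Int) × Int) idx =>
      let size := base + (if idx < remainder then (1:Int) else 0)
      (st.1 ++ [PySem.List.pyRange st.2 (st.2 + size) 1], st.2 + size))
    ([], 0)
  res.1

-- ===== PORT B =====
def partition_qubits_py_alt (num_qubits : Int) (num_components : Int) : List (List Int) :=
  let base := PySem.Int.floordiv num_qubits num_components
  let remainder := PySem.Int.mod num_qubits num_components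
  -- Python list repetition [x]*k repeats max(k,0) times; Int.toNat is exactly that
  let sizes := List.replicate remainder.toNat (base + 1)
            ++ List.replicate (num_components - remainder).toNat base
  let qubits := PySem.List.pyRange 0 num_qubits 1
  let res := sizes.foldl
    (fun (st : List (List Int) × List Int) size =>
      (st.1 ++ [PySem.List.slice st.2 none (some size)],
       PySem.List.slice st.2 (some size) none))
    ([], qubits)
  res.1

-- ===== PRECONDITION & SPEC =====
-- A raises ValueError when num_components <= 0 or num_qubits < num_components; exactly those are excluded.
def Pre_partition_qubits_py (num_qubits : Int) (num_components : Int) : Prop :=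
  0 < num_components ∧ num_components ≤ num_qubits
instance (num_qubits : Int) (num_components : Int) : Decidable (Pre_partition_qubits_py num_qubits num_components) := by unfold Pre_partition_qubits_py; infer_instance
def pvWitness_partition_qubits_py : Int × Int := (7, 3)
def Spec_partition_qubits_py (num_qubits : Int) (num_components : Int) (out : List (List Int)) : Prop := out = partition_qubits_py_alt num_qubits num_components
instance (num_qubits : Int) (num_components : Int) (out : List (List Int)) : Decidable (Spec_partition_qubits_py num_qubits num_components out) := by unfold Spec_partition_qubits_py; infer_instance

-- ===== CLAIM (what is proved, stated in full; the proofs are below) =====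
def Claim_equal_partition_qubits_py : Prop := ∀ (num_qubits : Int) (num_components : Int), Dom_partition_qubits_py num_qubits num_components → Pre_partition_qubits_py num_qubits num_components → Spec_partition_qubits_py num_qubits num_components (partition_qubits_py num_qubits num_components)

-- ===== LEMMAS AND PROOFS =====

-- common skeleton both ports are reduced to: consecutive blocks of the given sizes
def pqChunks (s : Int) : List Int → List (List Int)
  | [] => []
  | k :: ks => PySem.List.pyRange s (s + k) 1 :: pqChunks (s + k) ks

theorem pqChunks_append (s : Int) (ks ls : List Int) :
    pqChunks s (ks ++ ls) = pqChunks s ks ++ pqChunks (s + ks.sum) ls := by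
  induction ks generalizing s with
  | nil => simp [pqChunks]
  | cons k ks ih => simp [pqChunks, ih, add_assoc]

-- A's fold produces the chunks of its per-index sizes, threading the running sum
theorem pqA_fold (base r : Int) (n : Nat) :
    (PySem.List.pyRange 0 (n : Int) 1).foldl
      (fun (st : List (List Int) × Int) idx =>
        let size := base + (if idx < r then (1:Int) else 0)
        (st.1 ++ [PySem.List.pyRange st.2 (st.2 + size) 1], st.2 + size))
      ([], 0)
    = (pqChunks 0 ((PySem.List.pyRange 0 (n : Int) 1).map (fun i => base + (if i < r then (1:Int) else 0))),
       ((PySem.List.pyRange 0 (n : Int) 1).map (fun i => base + (if i < r then (1:Int) else 0))).sum) := by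
  induction n with
  | zero => simp [PySem.List.pyRange_one_eq_nil, pqChunks]
  | succ k ih =>
    have h : ((k : Int) + 1) = ((k + 1 : Nat) : Int) := by push_cast; ring
    rw [← h, PySem.List.pyRange_one_succ_right (by positivity), List.foldl_append,
      List.map_append, pqChunks_append, List.sum_append, ih]
    simp [pqChunks]

-- B's fold over a size list consumes a materialized range by slicing, producing the same chunks
theorem pqB_fold (sizes : List Int) (s e : Int) (blocks : List (List Int))
    (hpos : ∀ k ∈ sizes, 0 ≤ k) (hsum : s + sizes.sum ≤ e) :
    sizes.foldl
      (fun (st : List (List Int) × List Int) size =>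
        (st.1 ++ [PySem.List.slice st.2 none (some size)],
         PySem.List.slice st.2 (some size) none))
      (blocks, PySem.List.pyRange s e 1)
    = (blocks ++ pqChunks s sizes, PySem.List.pyRange (s + sizes.sum) e 1) := by
  induction sizes generalizing s blocks with
  | nil => simp [pqChunks]
  | cons k ks ih =>
    have hk : (0:Int) ≤ k := hpos k (by simp)
    have hks : ∀ x ∈ ks, (0:Int) ≤ x := fun x hx => hpos x (by simp [hx])
    have hsum' : 0 ≤ ks.sum := List.sum_nonneg hks
    have hsumk : s + k + ks.sum ≤ e := by
      have := hsum; simp [List.sum_cons] at this; omega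
    have hsplit : PySem.List.pyRange s e 1
        = PySem.List.pyRange s (s + k) 1 ++ PySem.List.pyRange (s + k) e 1 :=
      PySem.List.pyRange_one_append s (s + k) e (by omega) (by omega)
    have hlen : (PySem.List.pyRange s (s + k) 1).length = k.toNat := by
      rw [PySem.List.length_pyRange_one]; omega
    have htake : PySem.List.slice (PySem.List.pyRange s e 1) none (some k)
        = PySem.List.pyRange s (s + k) 1 := by
      rw [PySem.List.slice_to _ hk, hsplit, ← hlen, List.take_left]
    have hdrop : PySem.List.slice (PySem.List.pyRange s e 1) (some k) none
        = PySem.List.pyRange (s + k) e 1 := by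
      rw [PySem.List.slice_from _ hk, hsplit, ← hlen, List.drop_left]
    simp only [List.foldl_cons, htake, hdrop]
    rw [ih (s + k) _ hks (by omega)]
    simp [pqChunks, List.sum_cons, add_assoc]

-- A's per-index size list is exactly B's replicate-built size list
theorem pq_sizes_eq (base r c : Int) (hr0 : 0 ≤ r) (hrc : r ≤ c) :
    (PySem.List.pyRange 0 c 1).map (fun i => base + (if i < r then (1:Int) else 0))
    = List.replicate r.toNat (base + 1) ++ List.replicate (c - r).toNat base := by
  rw [PySem.List.pyRange_one_append 0 r c hr0 hrc, List.map_append]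
  congr 1
  · rw [List.map_congr_left (g := fun _ => base + 1)
      (fun i hi => by
        have := (PySem.List.mem_pyRange_one).1 hi
        simp [show i < r by omega])]
    rw [List.map_const', PySem.List.length_pyRange_one]
    congr 1; omega
  · rw [List.map_congr_left (g := fun _ => base)
      (fun i hi => by
        have := (PySem.List.mem_pyRange_one).1 hi
        simp [show ¬ i < r by omega])]
    rw [List.map_const', PySem.List.length_pyRange_one]

-- ===== VERDICT (by name: the statement is the Claim_ definition above) =====
theorem partition_qubits_py_spec : Claim_equal_partition_qubits_py := by
  intro nq nc _ hpre
  obtain ⟨hc, hq⟩ := hpre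
  unfold Spec_partition_qubits_py partition_qubits_py partition_qubits_py_alt
  dsimp only
  set base := PySem.Int.floordiv nq nc with hbase
  set r := PySem.Int.mod nq nc with hrr
  have hid : base * nc + r = nq := PySem.Int.floordiv_mul_add_mod nq nc
  have hr0 : 0 ≤ r := PySem.Int.mod_nonneg nq hc
  have hrlt : r < nc := PySem.Int.mod_lt nq hc
  have hbase1 : 1 ≤ base := by
    rw [hbase, PySem.Int.le_floordiv_iff_mul_le hc]; omega
  have hnc : nc = ((nc.toNat : Nat) : Int) := by omega
  -- sizes list facts
  have hpos : ∀ k ∈ List.replicate r.toNat (base + 1) ++ List.replicate (nc - r).toNat base,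
      (0:Int) ≤ k := by
    intro k hk
    rcases List.mem_append.1 hk with h | h <;>
      rw [List.eq_of_mem_replicate h] <;> omega
  have hsum : (List.replicate r.toNat (base + 1) ++ List.replicate (nc - r).toNat base).sum = nq := by
    rw [List.sum_append, List.sum_replicate, List.sum_replicate, nsmul_eq_mul, nsmul_eq_mul]
    have h1 : ((r.toNat : Nat) : Int) = r := by omega
    have h2 : (((nc - r).toNat : Nat) : Int) = nc - r := by omega
    push_cast [h1, h2]
    linear_combination hid
  rw [pqB_fold _ 0 nq [] hpos (by omega)]
  rw [hnc, pqA_fold base r nc.toNat]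
  rw [pq_sizes_eq base r ((nc.toNat : Nat) : Int) hr0 (by omega)]
  simp
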